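-- pv_equiv track=rewrite | github.com/zeidlitz/advent-of-code-24 | day21/main.py | get_rows_and_columns
-- ===== SOURCE A (Python) =====
-- def get_rows_and_columns(grid, s, d):
--     for i in range(len(grid)):
--         for j in range(len(grid[0])):
--
--             if grid[i][j] == s:
--                 sr = i
--                 sc = j
--
--             if grid[i][j] == d:
--                 dr = i
--                 dc = j
--     return sr, sc, dr, dc
-- ===== SOURCE B (Python) =====
-- def get_rows_and_columns(grid, s, d):
--     nrows, ncols = len(grid), len(grid[0])
--
--     def find_last(t):
--         for i in reversed(range(nrows)):
--             for j in reversed(range(ncols)):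
--                 if grid[i][j] == t:
--                     return i, j
--
--     sr, sc = find_last(s)
--     dr, dc = find_last(d)
--     return sr, sc, dr, dc
-- ===== Notes on version B (the rewrite author's own statement) =====
-- stated objective: alternative
-- what changed: Replaces A's single exhaustive forward sweep that keeps overwriting four variables with two independent reverse (bottom-right to top-left) scans that each return at the first hit, one per target character; Pre_ excludes inputs on which A raises (empty grid, a row shorter than the first, or a target character absent from the scanned cells).
import Mathlib
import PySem

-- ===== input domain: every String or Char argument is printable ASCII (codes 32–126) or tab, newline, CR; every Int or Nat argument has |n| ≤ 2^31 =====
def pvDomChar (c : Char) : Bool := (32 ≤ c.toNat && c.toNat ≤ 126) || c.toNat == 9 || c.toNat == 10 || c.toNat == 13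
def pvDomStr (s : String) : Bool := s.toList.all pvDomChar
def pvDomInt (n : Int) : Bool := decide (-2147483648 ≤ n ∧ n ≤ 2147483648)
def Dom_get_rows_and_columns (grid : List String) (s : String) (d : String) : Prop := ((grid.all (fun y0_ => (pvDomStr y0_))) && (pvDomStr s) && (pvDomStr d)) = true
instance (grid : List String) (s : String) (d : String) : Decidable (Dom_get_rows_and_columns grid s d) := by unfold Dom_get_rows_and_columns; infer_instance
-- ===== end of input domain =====

-- B replaces A's exhaustive forward sweep (overwriting four variables) by two independent
-- reverse scans with early exit (first reverse hit = last forward hit): an alternative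
-- decomposition, proved to return the same tuple on all inputs where A returns.

-- ===== PORT A =====
-- grid[i][j], read as a one-character string; default outside range (Pre_ keeps indices in range)
def pvCellA (grid : List String) (i j : Nat) : List Char := [((grid.getD i "").toList).getD j ' ']

-- literal transliteration of A: scan all cells forward, overwrite (sr,sc) / (dr,dc) on match
def get_rows_and_columns (grid : List String) (s : String) (d : String) : Int × Int × Int × Int :=
  let st := (List.range grid.length).foldl (fun st i =>
    (List.range (grid.headD "").toList.length).foldl (fun st j =>
      let st1 := if pvCellA grid i j = s.toList then ((some (i : Int), some (j : Int)), st.2) else st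
      if pvCellA grid i j = d.toList then (st1.1, (some (i : Int), some (j : Int))) else st1) st)
    (((none, none), (none, none)) : (Option Int × Option Int) × (Option Int × Option Int))
  (st.1.1.getD 0, st.1.2.getD 0, st.2.1.getD 0, st.2.2.getD 0)

-- ===== PORT B =====
-- Source B's inner loop 'for j in reversed(range(ncols))': first match from the right
def pvLastIdxB (t : String) (cs : List Char) : Nat → Option Nat
  | 0 => none
  | n + 1 => if [cs.getD n ' '] = t.toList then some n else pvLastIdxB t cs n

-- Source B's outer loop 'for i in reversed(range(nrows))' with early return from find_last
def pvFindLastB (t : String) (grid : List String) (ncols : Nat) : Nat → Option (Nat × Nat)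
  | 0 => none
  | n + 1 =>
    match pvLastIdxB t (grid.getD n "").toList ncols with
    | some j => some (n, j)
    | none => pvFindLastB t grid ncols n

def get_rows_and_columns_alt (grid : List String) (s : String) (d : String) : Int × Int × Int × Int :=
  let nrows := grid.length
  let ncols := (grid.headD "").toList.length
  match pvFindLastB s grid ncols nrows, pvFindLastB d grid ncols nrows with
  | some (sr, sc), some (dr, dc) => ((sr : Int), (sc : Int), (dr : Int), (dc : Int))
  | _, _ => (0, 0, 0, 0)   -- Source B raises TypeError (find_last returned None) here; outside Pre_

-- ===== PRECONDITION & SPEC =====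
-- 'character t occurs among the first ncols columns of some row' (Bool, so that Pre_ computes);
-- e.g. pvHas "c" 2 ["ab", "cd"] = true, pvHas "e" 2 ["ab", "cd"] = false
def pvHas (t : String) (ncols : Nat) (grid : List String) : Bool :=
  grid.any (fun row => (row.toList.take ncols).any (fun c => decide ([c] = t.toList)))

-- Pre_ is exactly where Python A returns: every row reaches len(grid[0]) columns (else IndexError)
-- and both s and d occur as a cell among the scanned columns (else UnboundLocalError).
def Pre_get_rows_and_columns (grid : List String) (s : String) (d : String) : Prop :=
  (∀ row ∈ grid, (grid.headD "").toList.length ≤ row.toList.length) ∧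
  pvHas s (grid.headD "").toList.length grid = true ∧
  pvHas d (grid.headD "").toList.length grid = true
instance (grid : List String) (s : String) (d : String) : Decidable (Pre_get_rows_and_columns grid s d) := by unfold Pre_get_rows_and_columns; infer_instance

def pvWitness_get_rows_and_columns : List String × String × String := (["ab", "cd"], "a", "d")

def Spec_get_rows_and_columns (grid : List String) (s : String) (d : String) (out : Int × Int × Int × Int) : Prop := out = get_rows_and_columns_alt grid s d
instance (grid : List String) (s : String) (d : String) (out : Int × Int × Int × Int) : Decidable (Spec_get_rows_and_columns grid s d out) := by unfold Spec_get_rows_and_columns; infer_instance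

-- ===== CLAIM (what is proved, stated in full; the proofs are below) =====
def Claim_equal_get_rows_and_columns : Prop := ∀ (grid : List String) (s : String) (d : String), Dom_get_rows_and_columns grid s d → Pre_get_rows_and_columns grid s d → Spec_get_rows_and_columns grid s d (get_rows_and_columns grid s d)

-- ===== LEMMAS AND PROOFS =====

-- the combined two-if step of A splits into two independent folds, one per target
theorem pv_foldl_two_ifs {α β γ : Type} (l : List α) (p q : α → Prop) [DecidablePred p] [DecidablePred q]
    (F : α → β) (G : α → γ) (a : β) (b : γ) :
    l.foldl (fun st x =>
      let st1 := if p x then (F x, st.2) else st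
      if q x then (st1.1, G x) else st1) (a, b)
    = (l.foldl (fun a x => if p x then F x else a) a,
       l.foldl (fun b x => if q x then G x else b) b) := by
  induction l generalizing a b with
  | nil => rfl
  | cons x xs ih =>
    simp only [List.foldl]
    split_ifs <;> simpa using ih _ _

theorem pv_foldl_prod {α β γ : Type} (l : List α) (f : β → α → β) (g : γ → α → γ) (a : β) (b : γ) :
    l.foldl (fun st x => (f st.1 x, g st.2 x)) (a, b) = (l.foldl f a, l.foldl g b) := by
  induction l generalizing a b with
  | nil => rfl
  | cons x xs ih => simpa using ih _ _

-- A's forward inner fold over columns computes B's first-from-the-right match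
theorem pv_inner (t : String) (grid : List String) (i : Nat) :
    ∀ (n : Nat) (o : Option Int × Option Int),
    (List.range n).foldl (fun a j => if pvCellA grid i j = t.toList then (some (i : Int), some (j : Int)) else a) o
    = match pvLastIdxB t (grid.getD i "").toList n with
      | some j => (some (i : Int), some (j : Int))
      | none => o := by
  intro n
  induction n with
  | zero => intro o; simp [pvLastIdxB]
  | succ n ih =>
    intro o
    rw [List.range_succ, List.foldl_append, ih o]
    simp only [List.foldl_cons, List.foldl_nil, pvCellA]
    by_cases h : [((grid.getD i "").toList).getD n ' '] = t.toList
    · rw [if_pos h]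
      simp only [pvLastIdxB, if_pos h]
    · rw [if_neg h]
      simp only [pvLastIdxB, if_neg h]

-- A's forward outer fold over rows computes B's reverse search with early return
theorem pv_outer (t : String) (grid : List String) (ncols : Nat) :
    ∀ (n : Nat) (o : Option Int × Option Int),
    (List.range n).foldl (fun a i =>
      (List.range ncols).foldl (fun a j =>
        if pvCellA grid i j = t.toList then (some (i : Int), some (j : Int)) else a) a) o
    = match pvFindLastB t grid ncols n with
      | some (i, j) => (some (i : Int), some (j : Int))
      | none => o := by
  intro n
  induction n with
  | zero => intro o; simp [pvFindLastB]
  | succ n ih =>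
    intro o
    rw [List.range_succ, List.foldl_append, ih o]
    simp only [List.foldl_cons, List.foldl_nil]
    rw [pv_inner t grid n ncols]
    cases hp : pvLastIdxB t (grid.getD n "").toList ncols <;>
      cases hq : pvFindLastB t grid ncols n <;>
      simp only [pvFindLastB, hp, hq]

theorem pvLastIdxB_none (t : String) (cs : List Char) :
    ∀ n, pvLastIdxB t cs n = none → ∀ j < n, [cs.getD j ' '] ≠ t.toList := by
  intro n
  induction n with
  | zero => intro _ j hj; omega
  | succ n ih =>
    intro h j hj
    simp only [pvLastIdxB] at h
    split_ifs at h with hc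
    rcases Nat.lt_succ_iff_lt_or_eq.mp hj with hlt | rfl
    · exact ih h j hlt
    · exact hc

theorem pvFindLastB_none (t : String) (grid : List String) (ncols : Nat) :
    ∀ n, pvFindLastB t grid ncols n = none →
      ∀ i < n, pvLastIdxB t (grid.getD i "").toList ncols = none := by
  intro n
  induction n with
  | zero => intro _ i hi; omega
  | succ n ih =>
    intro h i hi
    simp only [pvFindLastB] at h
    cases hq : pvLastIdxB t (grid.getD n "").toList ncols <;> rw [hq] at h
    · rcases Nat.lt_succ_iff_lt_or_eq.mp hi with hlt | rfl
      · exact ih h i hlt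
      · exact hq
    · exact absurd h (by simp)

theorem pvFindLastB_isSome (t : String) (grid : List String) (ncols : Nat)
    (h : pvHas t ncols grid = true) :
    (pvFindLastB t grid ncols grid.length).isSome := by
  rw [pvHas, List.any_eq_true] at h
  obtain ⟨row, hrow, hc⟩ := h
  simp only [List.any_eq_true, decide_eq_true_iff] at hc
  obtain ⟨c, hcmem, hct⟩ := hc
  obtain ⟨j, hj, hcj⟩ := List.getElem_of_mem hcmem
  rw [List.length_take] at hj
  have hjn : j < ncols := lt_of_lt_of_le hj (min_le_left _ _)
  have hjl : j < row.toList.length := lt_of_lt_of_le hj (min_le_right _ _)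
  obtain ⟨i, hi, hgi⟩ := List.getElem_of_mem hrow
  cases hp : pvFindLastB t grid ncols grid.length with
  | some v => simp
  | none =>
    exfalso
    have hq := pvFindLastB_none t grid ncols grid.length hp i hi
    apply pvLastIdxB_none t (grid.getD i "").toList ncols hq j hjn
    rw [List.getD_eq_getElem _ _ hi, hgi, List.getD_eq_getElem _ _ hjl]
    rw [List.getElem_take] at hcj
    rw [hcj, hct]

-- ===== VERDICT (by name: the statement is the Claim_ definition above) =====
theorem get_rows_and_columns_spec : Claim_equal_get_rows_and_columns := by
  intro grid s d _ hpre
  obtain ⟨hrows, hs, hd⟩ := hpre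
  unfold Spec_get_rows_and_columns get_rows_and_columns get_rows_and_columns_alt
  set ncols := (grid.headD "").toList.length with hnc
  rw [show (fun (st : (Option Int × Option Int) × (Option Int × Option Int)) (i : Nat) =>
        (List.range ncols).foldl (fun st j =>
          let st1 := if pvCellA grid i j = s.toList then ((some (i : Int), some (j : Int)), st.2) else st
          if pvCellA grid i j = d.toList then (st1.1, (some (i : Int), some (j : Int))) else st1) st)
      = (fun st i =>
        ((List.range ncols).foldl (fun a j => if pvCellA grid i j = s.toList then (some (i : Int), some (j : Int)) else a) st.1,
         (List.range ncols).foldl (fun b j => if pvCellA grid i j = d.toList then (some (i : Int), some (j : Int)) else b) st.2))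
      from funext fun st => funext fun i => by
        rw [← Prod.mk.eta (p := st)]
        exact pv_foldl_two_ifs (List.range ncols) _ _ _ _ st.1 st.2]
  rw [pv_foldl_prod (List.range grid.length)
      (fun (a : Option Int × Option Int) (i : Nat) => (List.range ncols).foldl (fun a j => if pvCellA grid i j = s.toList then (some (i : Int), some (j : Int)) else a) a)
      (fun (b : Option Int × Option Int) (i : Nat) => (List.range ncols).foldl (fun b j => if pvCellA grid i j = d.toList then (some (i : Int), some (j : Int)) else b) b)
      (none, none) (none, none)]
  rw [pv_outer s grid ncols grid.length, pv_outer d grid ncols grid.length]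
  have hS := pvFindLastB_isSome s grid ncols hs
  have hD := pvFindLastB_isSome d grid ncols hd
  cases hps : pvFindLastB s grid ncols grid.length with
  | none => rw [hps] at hS; simp at hS
  | some vs =>
    cases hpd : pvFindLastB d grid ncols grid.length with
    | none => rw [hpd] at hD; simp at hD
    | some vd =>
      obtain ⟨sr, sc⟩ := vs
      obtain ⟨dr, dc⟩ := vd
      simp [hps, hpd]
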